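-- pv_equiv track=rewrite | github.com/anmoljhamb/CodeChef | START82/MATDIF.py | ans
-- ===== SOURCE A (Python) =====
-- def ans(n: int) -> list[list]:
--
--     count = 1
--     arr = [[0 for _ in range(n)] for __ in range(n)]
--
--     for i in range(n):
--         for j in range(0, n, 2):
--             arr[i][j] = count
--             count += 1
--
--     for i in range(n):
--         for j in range(1, n, 2):
--             arr[i][j] = count
--             count += 1
--
--     return arr
-- ===== SOURCE B (Python) =====
-- def ans(n: int) -> list[list]:
--     e = (n + 1) // 2      # number of even-indexed columns in a row
--     o = n // 2            # number of odd-indexed columns in a row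
--     base = n * e          # entries written before the odd-column pass starts
--     return [[i * e + j // 2 + 1 if j % 2 == 0 else base + i * o + j // 2 + 1
--              for j in range(n)]
--             for i in range(n)]
-- ===== Notes on version B (the rewrite author's own statement) =====
-- stated objective: simpler
-- what changed: Replaces the two counter-driven fill passes over a preallocated mutable matrix by a single comprehension that computes each entry with a closed-form arithmetic formula (from the row index, the halved column index, and the counts of even-/odd-indexed columns), with no running counter and no in-place mutation.
import Mathlib
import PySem

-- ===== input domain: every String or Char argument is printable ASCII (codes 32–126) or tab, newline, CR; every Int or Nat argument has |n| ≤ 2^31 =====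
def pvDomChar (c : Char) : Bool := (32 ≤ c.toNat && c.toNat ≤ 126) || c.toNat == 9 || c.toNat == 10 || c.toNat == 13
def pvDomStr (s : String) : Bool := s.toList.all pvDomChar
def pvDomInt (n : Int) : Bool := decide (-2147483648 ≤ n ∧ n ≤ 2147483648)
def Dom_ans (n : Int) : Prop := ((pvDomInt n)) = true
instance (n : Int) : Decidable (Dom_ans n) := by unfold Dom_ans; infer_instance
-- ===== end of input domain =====

-- B computes each matrix entry by a closed-form formula in one comprehension instead of A's
-- two counter-driven fill passes over a mutable matrix; same asymptotic cost, simpler code.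

-- ===== PORT A =====
-- arr[i][j] = v; in A both indices come from range(n), so they are nonnegative and in range:
-- .toNat and the in-range set/modify are exact there (no clamping/wraparound is ever exercised).
def setCell (arr : List (List Int)) (i j : Nat) (v : Int) : List (List Int) :=
  arr.modify i (fun row => row.set j v)

def ans (n : Int) : List (List Int) :=
  let arr : List (List Int) :=
    (PySem.List.pyRange 0 n 1).map (fun _ => (PySem.List.pyRange 0 n 1).map (fun _ => (0 : Int)))
  let st1 := (PySem.List.pyRange 0 n 1).foldl (fun st i =>
      (PySem.List.pyRange 0 n 2).foldl
        (fun (st : List (List Int) × Int) j => (setCell st.1 i.toNat j.toNat st.2, st.2 + 1)) st)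
      (arr, 1)
  let st2 := (PySem.List.pyRange 0 n 1).foldl (fun st i =>
      (PySem.List.pyRange 1 n 2).foldl
        (fun (st : List (List Int) × Int) j => (setCell st.1 i.toNat j.toNat st.2, st.2 + 1)) st)
      st1
  st2.1

-- ===== PORT B =====
def ans_alt (n : Int) : List (List Int) :=
  let e := PySem.Int.floordiv (n + 1) 2
  let o := PySem.Int.floordiv n 2
  let base := n * e
  (PySem.List.pyRange 0 n 1).map (fun i =>
    (PySem.List.pyRange 0 n 1).map (fun j =>
      if PySem.Int.mod j 2 = 0 then i * e + PySem.Int.floordiv j 2 + 1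
      else base + i * o + PySem.Int.floordiv j 2 + 1))

-- ===== PRECONDITION & SPEC =====
def Spec_ans (n : Int) (out : List (List Int)) : Prop := out = ans_alt n
instance (n : Int) (out : List (List Int)) : Decidable (Spec_ans n out) := by unfold Spec_ans; infer_instance

-- ===== CLAIM (what is proved, stated in full; the proofs are below) =====
def Claim_equal_ans : Prop := ∀ (n : Int), Dom_ans n → Spec_ans n (ans n)

-- ===== LEMMAS AND PROOFS =====

-- the effect on one row of one inner loop 'for j in range(s, n, 2)' starting at counter c
def rowWrite (s m : Nat) (c : Int) (row : List Int) : List Int :=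
  (List.range m).foldl (fun r k => r.set (s + 2 * k) (c + k)) row

theorem rowWrite_succ (s m : Nat) (c : Int) (row : List Int) :
    rowWrite s (m + 1) c row = (rowWrite s m c row).set (s + 2 * m) (c + m) := by
  simp [rowWrite, List.range_succ]

theorem length_rowWrite (s m : Nat) (c : Int) (row : List Int) :
    (rowWrite s m c row).length = row.length := by
  induction m with
  | zero => simp [rowWrite]
  | succ m ih => rw [rowWrite_succ, List.length_set, ih]

theorem rowWrite_getElem? (s m : Nat) (c : Int) (row : List Int)
    (h : s + 2 * m ≤ row.length + 1) (b : Nat) :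
    (rowWrite s m c row)[b]? =
      if s ≤ b ∧ b < s + 2 * m ∧ (b - s) % 2 = 0 then some (c + ((b - s) / 2 : Nat))
      else row[b]? := by
  induction m with
  | zero =>
    simp only [rowWrite, List.range_zero, List.foldl_nil]
    split_ifs with hc
    · omega
    · rfl
  | succ m ih =>
    rw [rowWrite_succ, List.getElem?_set, length_rowWrite]
    by_cases hb : s + 2 * m = b
    · have hk : (b - s) / 2 = m := by omega
      rw [if_pos hb, if_pos (show s + 2 * m < row.length by omega),
        if_pos (show s ≤ b ∧ b < s + 2 * (m + 1) ∧ (b - s) % 2 = 0 by omega), hk]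
    · rw [if_neg hb, ih (by omega)]
      split_ifs with h1 h2
      · rfl
      · omega
      · omega
      · rfl

theorem modify_modify {α : Type} (l : List α) (i : Nat) (f g : α → α) :
    (l.modify i f).modify i g = l.modify i (fun x => g (f x)) := by
  apply List.ext_getElem?
  intro j
  by_cases h : i = j <;> simp [h, Option.map_map, Function.comp_def]

theorem modify_id {α : Type} (l : List α) (i : Nat) :
    l.modify i (fun x => x) = l := by
  apply List.ext_getElem?
  intro j
  by_cases h : i = j <;> simp [h]

-- the whole inner loop, as a modification of row i only
theorem innerFold (s' m i : Nat) (arr : List (List Int)) (c : Int) :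
    (List.range m).foldl
        (fun (st : List (List Int) × Int) k => (setCell st.1 i (s' + 2 * k) st.2, st.2 + 1))
        (arr, c)
      = (arr.modify i (rowWrite s' m c), c + m) := by
  induction m generalizing arr c with
  | zero =>
    have h0 : rowWrite s' 0 c = fun x => x := by funext row; rfl
    simp [h0, modify_id]
  | succ m ih =>
    rw [List.range_succ, List.foldl_append, ih]
    simp only [List.foldl_cons, List.foldl_nil, setCell, modify_modify, Prod.mk.injEq]
    refine ⟨?_, by push_cast; ring⟩
    congr 1
    funext row
    rw [rowWrite_succ]

-- the matrix after the first t rows of one pass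
def passArr (s' m : Nat) (c : Int) (t : Nat) (arr : List (List Int)) : List (List Int) :=
  (List.range t).foldl (fun a k => a.modify k (rowWrite s' m (c + k * m))) arr

theorem passArr_succ (s' m : Nat) (c : Int) (t : Nat) (arr : List (List Int)) :
    passArr s' m c (t + 1) arr
      = (passArr s' m c t arr).modify t (rowWrite s' m (c + t * m)) := by
  simp [passArr, List.range_succ]

theorem passFold (s' m : Nat) (t : Nat) (arr : List (List Int)) (c : Int) :
    (List.range t).foldl
        (fun (st : List (List Int) × Int) k => (st.1.modify k (rowWrite s' m st.2), st.2 + m))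
        (arr, c)
      = (passArr s' m c t arr, c + t * m) := by
  induction t with
  | zero => simp [passArr]
  | succ t ih =>
    rw [List.range_succ, List.foldl_append, ih]
    simp only [List.foldl_cons, List.foldl_nil]
    rw [passArr_succ]
    simp only [Prod.mk.injEq]
    exact ⟨trivial, by push_cast; ring⟩

theorem length_passArr (s' m : Nat) (c : Int) (t : Nat) (arr : List (List Int)) :
    (passArr s' m c t arr).length = arr.length := by
  induction t with
  | zero => simp [passArr]
  | succ t ih => rw [passArr_succ, List.length_modify, ih]

theorem passArr_getElem? (s' m : Nat) (c : Int) (t : Nat) (arr : List (List Int)) (a : Nat) :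
    (passArr s' m c t arr)[a]? =
      if a < t then Option.map (rowWrite s' m (c + a * m)) arr[a]? else arr[a]? := by
  induction t with
  | zero => simp [passArr]
  | succ t ih =>
    rw [passArr_succ, List.getElem?_modify, ih]
    by_cases h1 : t = a
    · subst h1
      simp
    · by_cases h2 : a < t
      · simp [h1, h2, Nat.lt_succ_of_lt h2]
      · simp [h1, h2, show ¬ a < t + 1 by omega]

-- one whole pass of A: 'for i in range(n): for j in range(s, n, 2): …'
theorem pass_eq (N s' m : Nat) (s : Int) (hs : s = (s' : Int))
    (hrange : PySem.List.pyRange (s' : Int) (N : Int) 2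
        = (List.range m).map (fun (k : Nat) => (s' : Int) + 2 * (k : Int)))
    (arr : List (List Int)) (c : Int) :
    (PySem.List.pyRange 0 (N : Int) 1).foldl
        (fun st i =>
          (PySem.List.pyRange s (N : Int) 2).foldl
            (fun (st : List (List Int) × Int) j => (setCell st.1 i.toNat j.toNat st.2, st.2 + 1)) st)
        (arr, c)
      = (passArr s' m c N arr, c + N * m) := by
  subst hs
  have hinner : ∀ (st : List (List Int) × Int) (i : Int),
      (PySem.List.pyRange (s' : Int) (N : Int) 2).foldl
        (fun (st : List (List Int) × Int) j => (setCell st.1 i.toNat j.toNat st.2, st.2 + 1)) st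
      = (st.1.modify i.toNat (rowWrite s' m st.2), st.2 + m) := by
    intro st i
    rw [hrange, List.foldl_map]
    have hbody : (fun (st : List (List Int) × Int) (k' : Nat) =>
          (setCell st.1 i.toNat ((s' : Int) + 2 * (k' : Int)).toNat st.2, st.2 + 1))
        = fun (st : List (List Int) × Int) (k' : Nat) =>
            (setCell st.1 i.toNat (s' + 2 * k') st.2, st.2 + 1) := by
      funext st k'
      have e2 : ((s' : Int) + 2 * (k' : Int)).toNat = s' + 2 * k' := by omega
      rw [e2]
    rw [hbody, innerFold]
  simp only [hinner]
  rw [PySem.List.pyRange_one, List.foldl_map]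
  have e0 : ∀ k : Nat, ((0 : Int) + (k : Int)).toNat = k := by intro k; omega
  simp only [e0, Int.sub_zero, Int.toNat_natCast]
  exact passFold s' m N arr c

theorem range0_eq (N : Nat) :
    PySem.List.pyRange ((0 : Nat) : Int) (N : Int) 2
      = (List.range ((N + 1) / 2)).map (fun (k : Nat) => ((0 : Nat) : Int) + 2 * (k : Int)) := by
  rw [PySem.List.pyRange_of_pos _ _ (by norm_num)]
  have h : (if ((0 : Nat) : Int) < (N : Int)
        then (((N : Int) - ((0 : Nat) : Int) + 2 - 1) / 2).toNat else 0) = (N + 1) / 2 := by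
    split_ifs with h <;> omega
  rw [h]

theorem range1_eq (N : Nat) :
    PySem.List.pyRange ((1 : Nat) : Int) (N : Int) 2
      = (List.range (N / 2)).map (fun (k : Nat) => ((1 : Nat) : Int) + 2 * (k : Int)) := by
  rw [PySem.List.pyRange_of_pos _ _ (by norm_num)]
  have h : (if ((1 : Nat) : Int) < (N : Int)
        then (((N : Int) - ((1 : Nat) : Int) + 2 - 1) / 2).toNat else 0) = N / 2 := by
    split_ifs with h <;> omega
  rw [h]

theorem fdiv_two_natCast (a : Nat) :
    PySem.Int.floordiv (a : Int) 2 = ((a / 2 : Nat) : Int) := by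
  unfold PySem.Int.floordiv
  rw [show (2 : Int) = ((2 : Nat) : Int) from rfl, ← Int.ofNat_fdiv]

theorem mod_two_natCast (a : Nat) :
    PySem.Int.mod (a : Int) 2 = ((a % 2 : Nat) : Int) := by
  unfold PySem.Int.mod
  rw [show (2 : Int) = ((2 : Nat) : Int) from rfl, ← Int.ofNat_fmod]

-- ===== VERDICT (by name: the statement is the Claim_ definition above) =====
theorem ans_spec : Claim_equal_ans := by
  unfold Claim_equal_ans
  intro n _
  unfold Spec_ans
  by_cases hle : n ≤ 0
  · simp [ans, ans_alt, PySem.List.pyRange_one_eq_nil hle]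
  · have hpos : 0 < n := by omega
    obtain ⟨N, rfl⟩ : ∃ N : Nat, (N : Int) = n := ⟨n.toNat, Int.toNat_of_nonneg hpos.le⟩
    have hN : 0 < N := by exact_mod_cast hpos
    obtain ⟨row0, hrow0⟩ : ∃ r, (PySem.List.pyRange 0 ((N : Nat) : Int) 1).map
        (fun _ => (0 : Int)) = r := ⟨_, rfl⟩
    obtain ⟨arr0, harr0⟩ : ∃ a, (PySem.List.pyRange 0 ((N : Nat) : Int) 1).map
        (fun _ => row0) = a := ⟨_, rfl⟩
    have hrow0_len : row0.length = N := by
      rw [← hrow0, List.length_map, PySem.List.length_pyRange_one]; omega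
    have harr0_len : arr0.length = N := by
      rw [← harr0, List.length_map, PySem.List.length_pyRange_one]; omega
    have harr0_get : ∀ a : Nat, a < N → arr0[a]? = some row0 := by
      intro a ha
      rw [← harr0]
      exact PySem.List.getElem?_map_pyRange_zero _ N a ha
    have h0 := pass_eq N 0 ((N + 1) / 2) 0 (by norm_num) (range0_eq N) arr0 1
    have h1 := pass_eq N 1 (N / 2) 1 (by norm_num) (range1_eq N)
      (passArr 0 ((N + 1) / 2) 1 N arr0) (1 + (N : Int) * (((N + 1) / 2 : Nat) : Int))
    unfold ans
    dsimp only
    rw [hrow0, harr0, h0, h1]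
    dsimp only
    unfold ans_alt
    dsimp only
    apply List.ext_getElem?
    intro a
    by_cases ha : a < N
    · rw [passArr_getElem?, if_pos ha, passArr_getElem?, if_pos ha, harr0_get a ha,
        PySem.List.getElem?_map_pyRange_zero _ N a ha]
      simp only [Option.map_some]
      congr 1
      apply List.ext_getElem?
      intro b
      by_cases hb : b < N
      · have hlen1 : (0 : Nat) + 2 * ((N + 1) / 2) ≤ row0.length + 1 := by omega
        have hlen2 : (1 : Nat) + 2 * (N / 2)
            ≤ (rowWrite 0 ((N + 1) / 2) (1 + (a : Int) * (((N + 1) / 2 : Nat) : Int)) row0).length + 1 := by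
          rw [length_rowWrite]; omega
        rw [rowWrite_getElem? _ _ _ _ hlen2 b, rowWrite_getElem? _ _ _ _ hlen1 b,
          PySem.List.getElem?_map_pyRange_zero _ N b hb]
        have hrow0_get : row0[b]? = some 0 := by
          rw [← hrow0]; exact PySem.List.getElem?_map_pyRange_zero _ N b hb
        rw [mod_two_natCast b, fdiv_two_natCast b,
          show ((N : Int) + 1) = (((N + 1 : Nat)) : Int) from by push_cast; ring,
          fdiv_two_natCast (N + 1), fdiv_two_natCast N, hrow0_get]
        by_cases hpar : b % 2 = 0
        · rw [if_neg (by omega), if_pos (by omega), if_pos (by simp [hpar])]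
          have hd : (b - 0) / 2 = b / 2 := by omega
          rw [hd]
          congr 1
          ring
        · rw [if_pos (by omega), if_neg (by
            intro hc
            have : (b % 2 : Nat) = 0 := by exact_mod_cast hc
            omega)]
          have hd : (b - 1) / 2 = b / 2 := by omega
          rw [hd]
          congr 1
          ring
      · trans (none : Option Int)
        · exact List.getElem?_eq_none (by
            rw [length_rowWrite, length_rowWrite, hrow0_len]; omega)
        · exact (List.getElem?_eq_none (by
            rw [List.length_map, PySem.List.length_pyRange_one]; omega)).symm
    · trans (none : Option (List Int))
      · exact List.getElem?_eq_none (by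
          rw [length_passArr, length_passArr, harr0_len]; omega)
      · exact (List.getElem?_eq_none (by
          rw [List.length_map, PySem.List.length_pyRange_one]; omega)).symm
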